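-- pv_equiv track=rewrite | github.com/Camp1on/structure | entity_extractor/data_scripts/entity_match.py | find_longest_match
-- ===== SOURCE A (Python) =====
-- def find_longest_match(ner_list):
--     if len(ner_list) == 0:
--         return []
--     i, j = -1, 0
--     long_match = []
--     tmp = [ner_list[0]]
--     while i < len(ner_list) and j < len(ner_list):
--         if i < 0:
--             i += 1
--             j += 1
--         else:
--             if ner_list[i]['endPosition'] == ner_list[j]['startPosition']:
--                 tmp.append(ner_list[j])
--                 i += 1
--                 j += 1
--             else:
--                 if len(tmp) > 1:
--                     long_match.append(tmp)
--                 tmp = [ner_list[j]]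
--                 i += 1
--                 j += 1
--     return long_match
-- ===== SOURCE B (Python) =====
-- def find_longest_match(ner_list):
--     # Two staged passes: first compute the break positions (cut indices) where
--     # adjacency fails, then slice the list between consecutive cuts and keep the
--     # slices longer than 1.  Unlike A, the trailing run is included (see D_).
--     n = len(ner_list)
--     cuts = [0] + [i for i in range(1, n)
--                   if ner_list[i - 1]['endPosition'] != ner_list[i]['startPosition']] + [n]
--     return [ner_list[a:b] for a, b in zip(cuts, cuts[1:]) if b - a > 1]
-- ===== Notes on version B (the rewrite author's own statement) =====
-- stated objective: alternative
-- what changed: Replaces A's two-index while loop with run accumulator by two staged passes: first compute the list of break indices (cut positions where adjacency fails), then slice the input between consecutive cuts and keep slices longer than 1, also flushing the trailing run that A forgets.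
-- intended difference: On inputs whose last two elements are adjacent (previous endPosition equals last startPosition), A omits the trailing adjacent run because its tmp group is never appended after the loop, while B returns it; including every maximal adjacent run of length > 1 is the intended behaviour of a longest-adjacent-match grouping. — e.g. on find_longest_match([[("startPosition", 0), ("endPosition", 1)], [("startPosition", 1), ("endPosition", 2)]]): A returns [], B returns [[[("startPosition", 0), ("endPosition", 1)], [("startPosition", 1), ("endPosition", 2)]]]
import Mathlib
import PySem

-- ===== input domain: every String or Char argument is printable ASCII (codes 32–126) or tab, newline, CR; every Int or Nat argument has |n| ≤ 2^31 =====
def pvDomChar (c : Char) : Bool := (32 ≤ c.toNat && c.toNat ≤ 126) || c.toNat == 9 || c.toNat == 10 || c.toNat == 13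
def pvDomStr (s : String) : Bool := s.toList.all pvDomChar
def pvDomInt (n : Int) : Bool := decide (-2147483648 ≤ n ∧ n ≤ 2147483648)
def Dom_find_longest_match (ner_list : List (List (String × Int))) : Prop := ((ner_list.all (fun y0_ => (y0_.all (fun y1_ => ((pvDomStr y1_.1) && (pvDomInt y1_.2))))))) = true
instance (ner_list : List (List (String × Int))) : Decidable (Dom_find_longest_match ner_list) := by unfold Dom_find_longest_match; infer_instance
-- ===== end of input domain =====

-- B is a two-staged reformulation: it first computes the cut indices where adjacency
-- fails and then slices the input between consecutive cuts, keeping the slices longer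
-- than 1 — including the trailing run, which A's loop never flushes (stated as D_ below).

-- d['endPosition'] / d['startPosition']: a missing key is KeyError in Python, excluded by
-- Pre_; the 0 default is never reached on inputs satisfying Pre_.
def pvLookE (d : List (String × Int)) : Int := (PySem.Dict.mk d).getD "endPosition" 0
def pvLookS (d : List (String × Int)) : Int := (PySem.Dict.mk d).getD "startPosition" 0

-- ===== PORT A =====
-- the while loop of A, state (i, j, long_match, tmp); ner_list[i] / ner_list[j] are in
-- range whenever read (the i ≥ 0 branch has 0 ≤ i < j < len), so .getD [] is never reached
def pvLoopA (ner : List (List (String × Int))) (i j : Int)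
    (lm : List (List (List (String × Int)))) (tmp : List (List (String × Int))) :
    List (List (List (String × Int))) :=
  if h : i < PySem.List.len ner ∧ j < PySem.List.len ner then
    if i < 0 then
      pvLoopA ner (i+1) (j+1) lm tmp
    else
      if pvLookE ((PySem.List.pyGet? ner i).getD []) = pvLookS ((PySem.List.pyGet? ner j).getD []) then
        pvLoopA ner (i+1) (j+1) lm (tmp ++ [(PySem.List.pyGet? ner j).getD []])
      else
        pvLoopA ner (i+1) (j+1) (if 1 < tmp.length then lm ++ [tmp] else lm)
          [(PySem.List.pyGet? ner j).getD []]
  else lm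
termination_by (PySem.List.len ner - j).toNat
decreasing_by all_goals (simp only [PySem.List.len_eq] at h ⊢; omega)

def find_longest_match (ner_list : List (List (String × Int))) : List (List (List (String × Int))) :=
  if PySem.List.len ner_list = 0 then []
  else pvLoopA ner_list (-1) 0 [] [(PySem.List.pyGet? ner_list 0).getD []]

-- ===== PORT B =====
-- the comprehension's condition 'ner_list[i-1][endPosition] != ner_list[i][startPosition]'
def pvBad (ner : List (List (String × Int))) (i : Int) : Bool :=
  decide (¬ pvLookE ((PySem.List.pyGet? ner (i-1)).getD []) = pvLookS ((PySem.List.pyGet? ner i).getD []))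

def find_longest_match_alt (ner_list : List (List (String × Int))) : List (List (List (String × Int))) :=
  let cuts : List Int :=
    0 :: ((PySem.List.pyRange 1 (PySem.List.len ner_list) 1).filter (pvBad ner_list)
      ++ [PySem.List.len ner_list])
  ((cuts.zip (PySem.List.slice cuts (some 1) none)).filter (fun p => decide (1 < p.2 - p.1))).map
    (fun p => PySem.List.slice ner_list (some p.1) (some p.2))

-- ===== PRECONDITION & SPEC =====
-- Pre_ excludes exactly the inputs where Python A (and B alike) raises KeyError: some
-- adjacent pair lacks the 'endPosition' key (left element) or 'startPosition' key (right).
def Pre_find_longest_match (ner_list : List (List (String × Int))) : Prop :=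
  ∀ i : Nat, i < ner_list.length - 1 →
    (((PySem.Dict.mk (ner_list.getD i [])).get? "endPosition").isSome ∧
     ((PySem.Dict.mk (ner_list.getD (i+1) [])).get? "startPosition").isSome)
instance (ner_list : List (List (String × Int))) : Decidable (Pre_find_longest_match ner_list) := by unfold Pre_find_longest_match; infer_instance

def pvWitness_find_longest_match : (List (List (String × Int))) :=
  [[("startPosition", 0), ("endPosition", 1)], [("startPosition", 5), ("endPosition", 7)]]

-- On inputs whose last two elements are adjacent (previous endPosition = last startPosition)
-- A returns the grouping without that trailing run (its tmp group is never flushed after the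
-- loop) while B includes it, which is the intended value for a longest-adjacent-match grouping.
def D_find_longest_match (ner_list : List (List (String × Int))) : Prop :=
  2 ≤ ner_list.length ∧
  ((PySem.Dict.mk (ner_list.getD (ner_list.length - 2) [])).get? "endPosition").isSome ∧
  (PySem.Dict.mk (ner_list.getD (ner_list.length - 2) [])).get? "endPosition" =
    (PySem.Dict.mk (ner_list.getD (ner_list.length - 1) [])).get? "startPosition"
instance (ner_list : List (List (String × Int))) : Decidable (D_find_longest_match ner_list) := by unfold D_find_longest_match; infer_instance

def Spec_find_longest_match (ner_list : List (List (String × Int))) (out : List (List (List (String × Int)))) : Prop := ¬ D_find_longest_match ner_list → out = find_longest_match_alt ner_list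
instance (ner_list : List (List (String × Int))) (out : List (List (List (String × Int)))) : Decidable (Spec_find_longest_match ner_list out) := by unfold Spec_find_longest_match; infer_instance

def pvDiffWitness_find_longest_match : (List (List (String × Int))) :=
  [[("startPosition", 0), ("endPosition", 1)], [("startPosition", 1), ("endPosition", 2)]]

def pvDiffWitnessOut_find_longest_match : (List (List (List (String × Int)))) × (List (List (List (String × Int)))) :=
  ([], [[[("startPosition", 0), ("endPosition", 1)], [("startPosition", 1), ("endPosition", 2)]]])

-- ===== CLAIM (what is proved, stated in full; the proofs are below) =====
def Claim_unchanged_find_longest_match : Prop := ∀ (ner_list : List (List (String × Int))), Dom_find_longest_match ner_list → Pre_find_longest_match ner_list → Spec_find_longest_match ner_list (find_longest_match ner_list)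
def Claim_changed_find_longest_match : Prop := Dom_find_longest_match (pvDiffWitness_find_longest_match) ∧ Pre_find_longest_match (pvDiffWitness_find_longest_match) ∧ D_find_longest_match (pvDiffWitness_find_longest_match) ∧ find_longest_match (pvDiffWitness_find_longest_match) = pvDiffWitnessOut_find_longest_match.1 ∧ find_longest_match_alt (pvDiffWitness_find_longest_match) = pvDiffWitnessOut_find_longest_match.2 ∧ pvDiffWitnessOut_find_longest_match.1 ≠ pvDiffWitnessOut_find_longest_match.2
def Claim_exact_find_longest_match : Prop := ∀ (ner_list : List (List (String × Int))), Dom_find_longest_match ner_list → Pre_find_longest_match ner_list → D_find_longest_match ner_list → find_longest_match ner_list ≠ find_longest_match_alt ner_list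

-- ===== LEMMAS AND PROOFS =====

-- abbreviation for the length-filter, used only in the proofs
def pvP (run : List (List (String × Int))) : Bool := decide (1 < run.length)

-- proof-side reference machine: one step of a run-grouping fold, state (runs, cur);
-- A's loop and B's cut/slice passes are both proved equal to (filters of) its result
def pvStepB (st : List (List (List (String × Int))) × List (List (String × Int)))
    (ent : List (String × Int)) :
    List (List (List (String × Int))) × List (List (String × Int)) :=
  if st.2 ≠ [] ∧ pvLookE (PySem.List.pyGetD st.2 (-1) []) = pvLookS ent then
    (st.1, st.2 ++ [ent])
  else
    ((if st.2 ≠ [] then st.1 ++ [st.2] else st.1), [ent])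

theorem pvStepB_pos (R : List (List (List (String × Int)))) (tmp : List (List (String × Int)))
    (ent : List (String × Int)) (h1 : tmp ≠ [])
    (h2 : pvLookE (PySem.List.pyGetD tmp (-1) []) = pvLookS ent) :
    pvStepB (R, tmp) ent = (R, tmp ++ [ent]) := by
  simp [pvStepB, h1, h2]

theorem pvStepB_neg (R : List (List (List (String × Int)))) (tmp : List (List (String × Int)))
    (ent : List (String × Int)) (h1 : tmp ≠ [])
    (h2 : ¬ pvLookE (PySem.List.pyGetD tmp (-1) []) = pvLookS ent) :
    pvStepB (R, tmp) ent = (R ++ [tmp], [ent]) := by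
  simp [pvStepB, h1, h2]

-- the current run stays nonempty through the fold
theorem pvFold_cur_ne (rest : List (List (String × Int))) :
    ∀ R tmp, tmp ≠ [] → (rest.foldl pvStepB (R, tmp)).2 ≠ [] := by
  induction rest with
  | nil => intro R tmp h; simpa using h
  | cons e rest ih =>
    intro R tmp h
    simp only [List.foldl_cons]
    by_cases hc : pvLookE (PySem.List.pyGetD tmp (-1) []) = pvLookS e
    · rw [pvStepB_pos _ _ _ h hc]; exact ih _ _ (by simp)
    · rw [pvStepB_neg _ _ _ h hc]; exact ih _ _ (by simp)

-- the current run always ends with the last element processed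
theorem pvFold_cur_last (rest : List (List (String × Int))) :
    ∀ R tmp, tmp ≠ [] →
      (rest.foldl pvStepB (R, tmp)).2.getLast? = (tmp ++ rest).getLast? := by
  induction rest with
  | nil => intro R tmp h; simp
  | cons e rest ih =>
    intro R tmp h
    simp only [List.foldl_cons]
    by_cases hc : pvLookE (PySem.List.pyGetD tmp (-1) []) = pvLookS e
    · rw [pvStepB_pos _ _ _ h hc, ih _ _ (by simp)]
      simp
    · rw [pvStepB_neg _ _ _ h hc, ih _ _ (by simp)]
      cases rest with
      | nil => simp [List.getLast?_append]
      | cons hd tl =>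
        simp only [List.getLast?_append]
        exact (Option.or_of_isSome (by simp)).symm

-- the trailing run is long iff the fold's last step appended, i.e. iff the last
-- element is adjacent to the run ending just before it
theorem pvFold_cur_long (l : List (List (String × Int))) (e : List (String × Int)) :
    ∀ R tmp, tmp ≠ [] →
      (1 < ((l ++ [e]).foldl pvStepB (R, tmp)).2.length ↔
        pvLookE ((PySem.List.pyGetD ((l.foldl pvStepB (R, tmp)).2) (-1) [])) = pvLookS e) := by
  intro R tmp h
  have hne := pvFold_cur_ne l R tmp h
  rw [List.foldl_append]
  rcases hSeq : l.foldl pvStepB (R, tmp) with ⟨R', t'⟩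
  rw [hSeq] at hne
  simp only [List.foldl_cons, List.foldl_nil]
  simp only at hne
  by_cases hc : pvLookE (PySem.List.pyGetD t' (-1) []) = pvLookS e
  · rw [pvStepB_pos _ _ _ hne hc]
    have := List.length_pos_iff.mpr hne
    simp only
    simp [hc]
    omega
  · rw [pvStepB_neg _ _ _ hne hc]
    simpa using hc

-- A's loop from state (k, k+1, lm, tmp) is the fold over the remaining suffix, with A's
-- accumulator the filtered image of the fold's, provided tmp ends with ner[k]
theorem pvLoopA_eq (ner : List (List (String × Int))) :
    ∀ (rest : List (List (String × Int))) (k : Nat)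
      (R : List (List (List (String × Int)))) (tmp : List (List (String × Int))),
      tmp ≠ [] → k < ner.length → rest = ner.drop (k+1) →
      tmp.getLast? = some (ner.getD k []) →
      pvLoopA ner (k : Int) ((k : Int)+1) (R.filter pvP) tmp =
        (rest.foldl pvStepB (R, tmp)).1.filter pvP := by
  intro rest
  induction rest with
  | nil =>
    intro k R tmp ht hk hdrop hlast
    have hlen : ner.length ≤ k + 1 := by
      have := congrArg List.length hdrop
      simp at this
      omega
    rw [pvLoopA, dif_neg]
    · simp
    · simp only [PySem.List.len_eq]
      omega
  | cons e rest ih =>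
    intro k R tmp ht hk hdrop hlast
    have hgete : ner[k+1]? = some e := by
      have := congrArg (fun l => l[0]?) hdrop
      simpa [List.getElem?_drop] using this.symm
    have hk1 : k + 1 < ner.length := List.getElem?_eq_some_iff.mp hgete |>.1
    have hdrop' : rest = ner.drop (k+2) := by
      have := congrArg (fun l => l.drop 1) hdrop
      simpa [List.drop_drop] using this
    have hlastval : PySem.List.pyGetD tmp (-1) [] = ner.getD k [] := by
      rw [PySem.List.pyGetD_neg_one tmp [] ht]
      have := List.getLast?_eq_some_getLast (l := tmp) ht
      rw [this] at hlast
      exact Option.some.inj hlast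
    have hgetk : (PySem.List.pyGet? ner (k : Int)).getD [] = ner.getD k [] := by
      simp [PySem.List.pyGet?_natCast, List.getD]
    have hgetk1 : (PySem.List.pyGet? ner ((k : Int) + 1)).getD [] = e := by
      have : ((k : Int) + 1) = ((k + 1 : Nat) : Int) := by push_cast; ring
      rw [this, PySem.List.pyGet?_natCast, hgete]
      rfl
    rw [pvLoopA, dif_pos (by simp only [PySem.List.len_eq]; omega), if_neg (by omega)]
    rw [hgetk, hgetk1]
    simp only [List.foldl_cons]
    by_cases hc : pvLookE (ner.getD k []) = pvLookS e
    · rw [if_pos hc]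
      rw [pvStepB_pos _ _ _ ht (by rw [hlastval]; exact hc)]
      have cast1 : (k : Int) + 1 = ((k + 1 : Nat) : Int) := by push_cast; ring
      rw [cast1]
      exact ih (k+1) R (tmp ++ [e]) (by simp) hk1 hdrop'
        (by simp [List.getLast?_append, List.getD, hgete])
    · rw [if_neg hc]
      rw [pvStepB_neg _ _ _ ht (by rw [hlastval]; exact hc)]
      have hfilt : (if 1 < tmp.length then R.filter pvP ++ [tmp] else R.filter pvP)
          = (R ++ [tmp]).filter pvP := by
        by_cases hl : 1 < tmp.length <;> simp [hl, List.filter_append, pvP]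
      rw [hfilt]
      have cast1 : (k : Int) + 1 = ((k + 1 : Nat) : Int) := by push_cast; ring
      rw [cast1]
      exact ih (k+1) (R ++ [tmp]) [e] (by simp) hk1 hdrop'
        (by simp [List.getD, hgete])

-- A on x :: rest is the filtered runs-part of the fold
theorem pvA_eq (x : List (String × Int)) (rest : List (List (String × Int))) :
    find_longest_match (x :: rest) = ((rest.foldl pvStepB ([], [x])).1).filter pvP := by
  rw [find_longest_match, if_neg (by simp only [PySem.List.len_eq, List.length_cons]; push_cast; omega)]
  rw [pvLoopA, dif_pos (by simp only [PySem.List.len_eq, List.length_cons]; push_cast; omega),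
    if_pos (by omega)]
  have h0 : (-1 : Int) + 1 = ((0 : Nat) : Int) := by norm_num
  have h1 : (0 : Int) + 1 = ((0 : Nat) : Int) + 1 := by norm_num
  rw [h0, h1]
  have := pvLoopA_eq (x :: rest) rest 0 [] [x] (by simp) (by simp) (by simp) (by simp [List.getD])
  simpa using this

-- the reference grouping into maximal adjacent runs, by right recursion
def pvGrp : List (List (String × Int)) → List (List (List (String × Int)))
  | [] => []
  | [x] => [[x]]
  | x :: y :: t =>
    match pvGrp (y :: t) with
    | [] => [[x]]
    | g :: gs => if pvLookE x = pvLookS y then (x :: g) :: gs else [x] :: g :: gs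

-- the first group of pvGrp (y :: t) starts with y
theorem pvGrp_cons (y : List (String × Int)) (t : List (List (String × Int))) :
    ∃ g gs, pvGrp (y :: t) = (y :: g) :: gs := by
  induction t generalizing y with
  | nil => exact ⟨[], [], rfl⟩
  | cons z t' ih =>
    obtain ⟨g, gs, hg⟩ := ih z
    by_cases hadj : pvLookE y = pvLookS z
    · exact ⟨z :: g, gs, by simp [pvGrp, hg, hadj]⟩
    · exact ⟨[], (z :: g) :: gs, by simp [pvGrp, hg, hadj]⟩

-- attaching a pending run in front of a grouping
def pvGlue (tmp : List (List (String × Int))) (gs : List (List (List (String × Int)))) :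
    List (List (List (String × Int))) :=
  match gs with
  | [] => [tmp]
  | g :: gs' =>
    if pvLookE (PySem.List.pyGetD tmp (-1) []) = pvLookS (g.headD []) then
      (tmp ++ g) :: gs'
    else tmp :: g :: gs'

theorem pvGetD_append_singleton (tmp : List (List (String × Int))) (y : List (String × Int)) :
    PySem.List.pyGetD (tmp ++ [y]) (-1) [] = y := by
  rw [PySem.List.pyGetD_neg_one _ [] (by simp)]
  simp

theorem pvGetD_single (y : List (String × Int)) :
    PySem.List.pyGetD [y] (-1) [] = y := by
  have := pvGetD_append_singleton [] y
  simpa using this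

theorem pvGlue_adj (tmp y : _) (t : List (List (String × Int)))
    (h : pvLookE (PySem.List.pyGetD tmp (-1) []) = pvLookS y) :
    pvGlue tmp (pvGrp (y :: t)) = pvGlue (tmp ++ [y]) (pvGrp t) := by
  cases t with
  | nil =>
    show pvGlue tmp [[y]] = pvGlue (tmp ++ [y]) []
    simp only [pvGlue, List.headD_cons, if_pos h]
  | cons z t' =>
    obtain ⟨g, gs, hg⟩ := pvGrp_cons z t'
    by_cases hadj : pvLookE y = pvLookS z
    · have hL : pvGrp (y :: z :: t') = (y :: z :: g) :: gs := by simp [pvGrp, hg, hadj]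
      rw [hL, hg]
      simp only [pvGlue, List.headD_cons, pvGetD_append_singleton, if_pos h, if_pos hadj]
      simp
    · have hL : pvGrp (y :: z :: t') = [y] :: (z :: g) :: gs := by simp [pvGrp, hg, hadj]
      rw [hL, hg]
      simp only [pvGlue, List.headD_cons, pvGetD_append_singleton, if_pos h, if_neg hadj]

theorem pvGlue_nadj (tmp y : _) (t : List (List (String × Int)))
    (h : ¬ pvLookE (PySem.List.pyGetD tmp (-1) []) = pvLookS y) :
    pvGlue tmp (pvGrp (y :: t)) = tmp :: pvGlue [y] (pvGrp t) := by
  cases t with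
  | nil =>
    show pvGlue tmp [[y]] = tmp :: pvGlue [y] []
    simp only [pvGlue, List.headD_cons, if_neg h]
  | cons z t' =>
    obtain ⟨g, gs, hg⟩ := pvGrp_cons z t'
    by_cases hadj : pvLookE y = pvLookS z
    · have hL : pvGrp (y :: z :: t') = (y :: z :: g) :: gs := by simp [pvGrp, hg, hadj]
      rw [hL, hg]
      simp only [pvGlue, List.headD_cons, pvGetD_single, if_neg h, if_pos hadj]
      simp
    · have hL : pvGrp (y :: z :: t') = [y] :: (z :: g) :: gs := by simp [pvGrp, hg, hadj]
      rw [hL, hg]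
      simp only [pvGlue, List.headD_cons, pvGetD_single, if_neg h, if_neg hadj]

-- flushing the fold gives the pending run glued onto the grouping of the suffix
theorem pvFoldFlush (rest : List (List (String × Int))) :
    ∀ R tmp, tmp ≠ [] →
      (rest.foldl pvStepB (R, tmp)).1 ++ [(rest.foldl pvStepB (R, tmp)).2]
        = R ++ pvGlue tmp (pvGrp rest) := by
  induction rest with
  | nil => intro R tmp h; simp [pvGlue, pvGrp]
  | cons y t ih =>
    intro R tmp h
    simp only [List.foldl_cons]
    by_cases hc : pvLookE (PySem.List.pyGetD tmp (-1) []) = pvLookS y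
    · rw [pvStepB_pos _ _ _ h hc, ih _ _ (by simp), pvGlue_adj tmp y t hc]
    · rw [pvStepB_neg _ _ _ h hc, ih _ _ (by simp), pvGlue_nadj tmp y t hc]
      simp

theorem pvGlue_single (x : List (String × Int)) (rest : List (List (String × Int))) :
    pvGlue [x] (pvGrp rest) = pvGrp (x :: rest) := by
  cases rest with
  | nil => simp [pvGrp, pvGlue]
  | cons y t =>
    obtain ⟨g, gs, hg⟩ := pvGrp_cons y t
    rw [hg]
    by_cases hadj : pvLookE x = pvLookS y
    · have hR : pvGrp (x :: y :: t) = (x :: y :: g) :: gs := by simp [pvGrp, hg, hadj]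
      rw [hR]
      simp only [pvGlue, List.headD_cons, pvGetD_single, if_pos hadj]
      simp
    · have hR : pvGrp (x :: y :: t) = [x] :: (y :: g) :: gs := by simp [pvGrp, hg, hadj]
      rw [hR]
      simp only [pvGlue, List.headD_cons, pvGetD_single, if_neg hadj]

-- the flushed fold on x :: rest IS the grouping
theorem pvFlush_eq_grp (x : List (String × Int)) (rest : List (List (String × Int))) :
    (rest.foldl pvStepB ([], [x])).1 ++ [(rest.foldl pvStepB ([], [x])).2] = pvGrp (x :: rest) := by
  rw [pvFoldFlush rest [] [x] (by simp), pvGlue_single]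
  simp

-- B's pair list (cut, next cut) starting at cut k
def pvPairs (ner : List (List (String × Int))) (k : Nat) : List (Int × Int) :=
  let L : List Int := (k : Int) ::
    ((PySem.List.pyRange ((k : Int) + 1) (PySem.List.len ner) 1).filter (pvBad ner)
      ++ [PySem.List.len ner])
  L.zip (L.drop 1)

theorem pvSliceCons (ner : List (List (String × Int))) (k : Nat) (b : Int)
    (hk : k < ner.length) (hb : (k : Int) < b) :
    PySem.List.slice ner (some (k : Int)) (some b)
      = ner[k] :: PySem.List.slice ner (some ((k : Int) + 1)) (some b) := by
  rw [PySem.List.slice_toNat _ (by positivity) (by omega),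
      PySem.List.slice_toNat _ (by omega) (by omega)]
  have h1 : ((k : Int)).toNat = k := Int.toNat_natCast k
  have h2 : (((k : Int)) + 1).toNat = k + 1 := by omega
  rw [h1, h2, List.drop_eq_getElem_cons hk]
  have h3 : b.toNat - k = (b.toNat - (k + 1)) + 1 := by omega
  rw [h3, List.take_succ_cons]

-- the slices between consecutive cuts from k are exactly the groups of the suffix from k,
-- each paired with its width
theorem pvPairsMap (ner : List (List (String × Int))) :
    ∀ (d k : Nat), ner.length - k = d → k < ner.length →
      (pvPairs ner k).map (fun p => (PySem.List.slice ner (some p.1) (some p.2), p.2 - p.1))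
        = (pvGrp (ner.drop k)).map (fun g => (g, (g.length : Int))) := by
  intro d
  induction d with
  | zero => intro k hd hk; omega
  | succ d ih =>
    intro k hd hk
    have hdropk : ner.drop k = ner[k] :: ner.drop (k+1) := List.drop_eq_getElem_cons hk
    by_cases hkn : k + 1 = ner.length
    · -- last element: cuts are [k, n], one slice of width 1
      have hrange : PySem.List.pyRange ((k : Int) + 1) (PySem.List.len ner) 1 = [] :=
        PySem.List.pyRange_one_eq_nil (by simp only [PySem.List.len_eq]; omega)
      have hdrop1 : ner.drop (k+1) = [] := List.drop_eq_nil_of_le (by omega)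
      have hslice : PySem.List.slice ner (some (k : Int)) (some (PySem.List.len ner)) = [ner[k]] := by
        rw [PySem.List.len_eq, PySem.List.slice_toNat _ (by positivity) (by positivity)]
        rw [Int.toNat_natCast, Int.toNat_natCast, hdropk, hdrop1]
        rw [show ner.length - k = 1 by omega]
        simp
      simp only [pvPairs, hrange, List.filter_nil, List.nil_append, List.drop_succ_cons,
        List.drop_zero, List.zip_cons_cons, List.zip_nil_right,
        List.map_cons, List.map_nil]
      rw [hslice, hdropk, hdrop1]
      simp only [pvGrp, List.map_cons, List.map_nil, PySem.List.len_eq, List.length_cons,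
        List.length_nil]
      simp
      omega
    · have hk1 : k + 1 < ner.length := by omega
      have hdropk1 : ner.drop (k+1) = ner[k+1] :: ner.drop (k+2) := List.drop_eq_getElem_cons hk1
      have hcons : PySem.List.pyRange ((k : Int) + 1) ((ner.length : Int)) 1
          = ((k : Int) + 1) :: PySem.List.pyRange ((k : Int) + 1 + 1) ((ner.length : Int)) 1 :=
        PySem.List.pyRange_one_cons (by omega)
      have hbadval : pvBad ner ((k : Int) + 1)
          = decide (¬ pvLookE ner[k] = pvLookS ner[k+1]) := by
        have e1 : ((k : Int) + 1) - 1 = ((k : Nat) : Int) := by omega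
        have e2 : ((k : Int) + 1) = ((k + 1 : Nat) : Int) := by push_cast; ring
        rw [pvBad, e1]
        rw [show (PySem.List.pyGet? ner ((k:Nat):Int)) = some ner[k] by
          rw [PySem.List.pyGet?_natCast]; exact List.getElem?_eq_getElem hk]
        rw [e2, show (PySem.List.pyGet? ner ((k+1:Nat):Int)) = some ner[k+1] by
          rw [PySem.List.pyGet?_natCast]; exact List.getElem?_eq_getElem hk1]
        rfl
      have hcast1 : ((k : Int) + 1) = ((k + 1 : Nat) : Int) := by push_cast; ring
      have ecast : ((k + 1 : Nat) : Int) + 1 = (k : Int) + 1 + 1 := by push_cast; ring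
      have ihk1 := ih (k+1) (by omega) hk1
      have hPairs : ∀ (j : Nat),
          pvPairs ner j = (((j : Nat) : Int) ::
              ((PySem.List.pyRange (((j : Nat) : Int) + 1) ((ner.length : Int)) 1).filter (pvBad ner)
                ++ [((ner.length : Int))])).zip
            ((PySem.List.pyRange (((j : Nat) : Int) + 1) ((ner.length : Int)) 1).filter (pvBad ner)
                ++ [((ner.length : Int))]) := by
        intro j
        simp only [pvPairs, PySem.List.len_eq, List.drop_succ_cons, List.drop_zero]
      set F := (PySem.List.pyRange ((k : Int) + 1 + 1) ((ner.length : Int)) 1).filter (pvBad ner) with hF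
      have hFbound : ∀ b ∈ F ++ [((ner.length : Int))], (k : Int) + 1 < b ∧ b ≤ (ner.length : Int) := by
        intro b hbmem
        rcases List.mem_append.mp hbmem with hbF | hbn
        · have := List.mem_of_mem_filter hbF
          rw [PySem.List.mem_pyRange_one] at this
          omega
        · simp only [List.mem_singleton] at hbn
          subst hbn
          constructor
          · omega
          · omega
      obtain ⟨b, M', hM⟩ : ∃ b M', F ++ [((ner.length : Int))] = b :: M' := by
        cases hFc : F with
        | nil => exact ⟨((ner.length : Int)), [], by simp⟩
        | cons f F' => exact ⟨f, F' ++ [((ner.length : Int))], by simp⟩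
      have hbnd := hFbound b (by rw [hM]; simp)
      by_cases hadj : pvLookE ner[k] = pvLookS ner[k+1]
      · -- adjacent: no cut at k+1; first slice extends the first slice from k+1 by ner[k]
        have hbadf : pvBad ner ((k : Int) + 1) = false := by rw [hbadval]; simp [hadj]
        have hPk : pvPairs ner k = ((k : Int), b) :: (b :: M').zip M' := by
          rw [hPairs k, hcons, List.filter_cons, hbadf]
          simp only [Bool.false_eq_true, if_false, ← hF, hM]
          simp [List.zip_cons_cons]
        have hPk1 : pvPairs ner (k+1) = (((k + 1 : Nat) : Int), b) :: (b :: M').zip M' := by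
          rw [hPairs (k+1), ecast]
          simp only [← hF, hM]
          simp [List.zip_cons_cons]
        obtain ⟨g, gs, hg⟩ := pvGrp_cons (ner[k+1]) (ner.drop (k+2))
        rw [hPk1, hdropk1, hg, List.map_cons, List.map_cons] at ihk1
        have hhead := (List.cons.injEq _ _ _ _).mp ihk1 |>.1
        have htail := (List.cons.injEq _ _ _ _).mp ihk1 |>.2
        have hsl : PySem.List.slice ner (some ((k + 1 : Nat) : Int)) (some b) = ner[k+1] :: g :=
          congrArg Prod.fst hhead
        have hw : b - ((k + 1 : Nat) : Int) = (((ner[k+1] :: g) : List _).length : Int) :=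
          congrArg Prod.snd hhead
        have hgrpk : pvGrp (ner.drop k) = (ner[k] :: ner[k+1] :: g) :: gs := by
          rw [hdropk, hdropk1]
          simp only [pvGrp]
          rw [hg]
          simp [hadj]
        rw [hPk, hgrpk, List.map_cons, List.map_cons]
        refine List.cons_eq_cons.mpr ⟨?_, htail⟩
        simp only [Prod.mk.injEq]
        refine ⟨?_, ?_⟩
        · rw [pvSliceCons ner k b hk (by omega), hcast1, hsl]
        · simp only [List.length_cons] at hw ⊢
          push_cast at hw ⊢
          omega
      · -- break at k+1: a width-1 slice [ner[k]], then everything from k+1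
        have hbadt : pvBad ner ((k : Int) + 1) = true := by rw [hbadval]; simp [hadj]
        have hPk : pvPairs ner k = ((k : Int), (k : Int) + 1) :: pvPairs ner (k+1) := by
          rw [hPairs k, hPairs (k+1), hcons, List.filter_cons, hbadt, ecast]
          simp [List.zip_cons_cons]
        have hsl1 : PySem.List.slice ner (some (k : Int)) (some ((k : Int) + 1)) = [ner[k]] := by
          rw [pvSliceCons ner k ((k : Int) + 1) hk (by omega)]
          rw [PySem.List.slice_toNat _ (by omega) (by omega)]
          have h2 : (((k : Int)) + 1).toNat = k + 1 := by omega
          rw [h2]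
          simp
        have hgrpk : pvGrp (ner.drop k) = [ner[k]] :: pvGrp (ner.drop (k+1)) := by
          obtain ⟨g, gs, hg⟩ := pvGrp_cons (ner[k+1]) (ner.drop (k+2))
          rw [hdropk, hdropk1]
          simp only [pvGrp]
          rw [hg]
          simp [hadj]
        rw [hPk, hgrpk, List.map_cons, List.map_cons, hsl1, ihk1]
        refine List.cons_eq_cons.mpr ⟨?_, rfl⟩
        simp

-- from the pairwise correspondence, filtering wide pairs then slicing equals
-- filtering long groups
theorem pvFilterMapBridge (ner : List (List (String × Int))) :
    ∀ (l : List (Int × Int)) (l' : List (List (List (String × Int)))),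
      l.map (fun p => (PySem.List.slice ner (some p.1) (some p.2), p.2 - p.1))
        = l'.map (fun g => (g, (g.length : Int))) →
      (l.filter (fun p => decide (1 < p.2 - p.1))).map
          (fun p => PySem.List.slice ner (some p.1) (some p.2))
        = l'.filter pvP := by
  intro l
  induction l with
  | nil =>
    intro l' h
    cases l' with
    | nil => simp
    | cons g gs => simp at h
  | cons p l ih =>
    intro l' h
    cases l' with
    | nil => simp at h
    | cons g gs =>
      simp only [List.map_cons] at h
      have hhead := (List.cons.injEq _ _ _ _).mp h |>.1
      have htail := (List.cons.injEq _ _ _ _).mp h |>.2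
      have hsl : PySem.List.slice ner (some p.1) (some p.2) = g := congrArg Prod.fst hhead
      have hw : p.2 - p.1 = (g.length : Int) := congrArg Prod.snd hhead
      simp only [List.filter_cons]
      by_cases hl : 1 < g.length
      · rw [show decide (1 < p.2 - p.1) = true by
            rw [hw]; exact decide_eq_true (by exact_mod_cast hl),
          show pvP g = true from decide_eq_true hl]
        simp only [if_true]
        rw [List.map_cons, hsl, ih gs htail]
      · rw [show decide (1 < p.2 - p.1) = false by rw [hw]; simp; omega,
          show pvP g = false by simp [pvP]; omega]
        simp only [Bool.false_eq_true, if_false]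
        exact ih gs htail

-- B on x :: rest is the same fold with the trailing run flushed
theorem pvB_eq (x : List (String × Int)) (rest : List (List (String × Int))) :
    find_longest_match_alt (x :: rest) =
      ((rest.foldl pvStepB ([], [x])).1).filter pvP ++
        (if pvP (rest.foldl pvStepB ([], [x])).2 then [(rest.foldl pvStepB ([], [x])).2] else []) := by
  have hlen : 0 < (x :: rest).length := by simp
  have hmap := pvPairsMap (x :: rest) ((x :: rest).length) 0 (by omega) hlen
  simp only [List.drop_zero] at hmap
  have hB : find_longest_match_alt (x :: rest) =
      ((pvPairs (x :: rest) 0).filter (fun p => decide (1 < p.2 - p.1))).map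
        (fun p => PySem.List.slice (x :: rest) (some p.1) (some p.2)) := by
    rw [find_longest_match_alt, pvPairs]
    simp only [PySem.List.slice_from_one, Nat.cast_zero, zero_add]
    rw [show ∀ (L : List Int), L.drop 1 = L.tail from fun L => List.drop_one]
  rw [hB, pvFilterMapBridge (x :: rest) _ _ hmap]
  rw [show pvGrp (x :: rest) = (rest.foldl pvStepB ([], [x])).1 ++ [(rest.foldl pvStepB ([], [x])).2] from (pvFlush_eq_grp x rest).symm]
  rw [List.filter_append]
  congr 1
  by_cases hp : pvP (rest.foldl pvStepB ([], [x])).2 <;> simp [hp]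

-- the two getD-index facts for ner = (x :: l) ++ [e]
theorem pvGetD_secondlast (x e : List (String × Int)) (l : List (List (String × Int))) :
    (x :: (l ++ [e])).getD ((x :: (l ++ [e])).length - 2) [] = (x :: l).getLast (by simp) := by
  have h1 : (x :: (l ++ [e])) = (x :: l) ++ [e] := by simp
  have h2 : (x :: (l ++ [e])).length - 2 = l.length := by simp
  rw [h2, List.getD, h1, List.getElem?_append_left (by simp)]
  rw [List.getLast_eq_getElem]
  simp
  rfl

theorem pvGetD_last (x e : List (String × Int)) (l : List (List (String × Int))) :
    (x :: (l ++ [e])).getD ((x :: (l ++ [e])).length - 1) [] = e := by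
  have h1 : (x :: (l ++ [e])) = (x :: l) ++ [e] := by simp
  have h2 : (x :: (l ++ [e])).length - 1 = l.length + 1 := by simp
  rw [h2, List.getD, h1, List.getElem?_append_right (by simp)]
  simp

-- the trailing run of the fold is long iff D_ holds, given Pre_
theorem pvLong_iff_D (x e : List (String × Int)) (l : List (List (String × Int)))
    (hpre : Pre_find_longest_match (x :: (l ++ [e]))) :
    (1 < ((l ++ [e]).foldl pvStepB ([], [x])).2.length ↔ D_find_longest_match (x :: (l ++ [e]))) := by
  have hxne : ([x] : List (List (String × Int))) ≠ [] := by simp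
  rw [pvFold_cur_long l e [] [x] hxne]
  have hcur_ne := pvFold_cur_ne l [] [x] hxne
  have hcur_last := pvFold_cur_last l [] [x] hxne
  have hgl : ((l.foldl pvStepB ([], [x])).2).getLast? = (x :: l).getLast? := by
    rw [hcur_last]; rfl
  have hval : PySem.List.pyGetD ((l.foldl pvStepB ([], [x])).2) (-1) [] = (x :: l).getLast (by simp) := by
    rw [PySem.List.pyGetD_neg_one _ [] hcur_ne]
    have := List.getLast?_eq_some_getLast (l := (l.foldl pvStepB ([], [x])).2) hcur_ne
    rw [hgl, List.getLast?_eq_some_getLast (l := x :: l) (by simp)] at this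
    exact Option.some.inj this.symm
  rw [hval]
  have hsec := pvGetD_secondlast x e l
  have hlst := pvGetD_last x e l
  obtain ⟨hsomeE, hsomeS⟩ := hpre l.length (by simp)
  have hidx1 : (x :: (l ++ [e])).getD l.length [] = (x :: l).getLast (by simp) := by
    have : (x :: (l ++ [e])).length - 2 = l.length := by simp
    rw [← this]; exact hsec
  have hidx2 : (x :: (l ++ [e])).getD (l.length + 1) [] = e := by
    have : (x :: (l ++ [e])).length - 1 = l.length + 1 := by simp
    rw [← this]; exact hlst
  rw [hidx1] at hsomeE
  rw [hidx2] at hsomeS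
  obtain ⟨vE, hvE⟩ := Option.isSome_iff_exists.mp hsomeE
  obtain ⟨vS, hvS⟩ := Option.isSome_iff_exists.mp hsomeS
  constructor
  · intro heq
    refine ⟨by simp, ?_, ?_⟩
    · rw [hsec]; exact hsomeE
    · rw [hsec, hlst, hvE, hvS]
      rw [pvLookE, pvLookS, PySem.Dict.getD_eq_get?_getD, PySem.Dict.getD_eq_get?_getD, hvE, hvS] at heq
      simpa using heq
  · rintro ⟨-, -, heq⟩
    rw [hsec, hlst, hvE, hvS] at heq
    rw [pvLookE, pvLookS, PySem.Dict.getD_eq_get?_getD, PySem.Dict.getD_eq_get?_getD, hvE, hvS]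
    simpa using heq

theorem pvUnchanged : ∀ (ner : List (List (String × Int))),
    Pre_find_longest_match ner → ¬ D_find_longest_match ner →
    find_longest_match ner = find_longest_match_alt ner := by
  intro ner hpre hnd
  match ner with
  | [] => rfl
  | x :: rest =>
    rw [pvA_eq, pvB_eq]
    rcases List.eq_nil_or_concat rest with hrest | ⟨l, e, hrest⟩
    · subst hrest
      simp [pvP]
    · subst hrest
      simp only [List.concat_eq_append] at *
      have hlong := pvLong_iff_D x e l hpre
      have : ¬ (1 < ((l ++ [e]).foldl pvStepB ([], [x])).2.length) := fun h => hnd (hlong.mp h)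
      have hp : pvP ((l ++ [e]).foldl pvStepB ([], [x])).2 = false := by
        simpa [pvP] using this
      rw [hp]
      simp

theorem pvChangedA : find_longest_match pvDiffWitness_find_longest_match = [] := by
  rw [show pvDiffWitness_find_longest_match =
    [("startPosition", (0:Int)), ("endPosition", 1)] :: [[("startPosition", (1:Int)), ("endPosition", 2)]] from rfl, pvA_eq]
  decide

-- ===== VERDICT (by name: the statement is the Claim_ definition above) =====
theorem find_longest_match_spec : Claim_unchanged_find_longest_match := by
  intro ner _ hpre
  unfold Spec_find_longest_match
  intro hnd
  exact pvUnchanged ner hpre hnd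

theorem find_longest_match_changed : Claim_changed_find_longest_match := by
  unfold Claim_changed_find_longest_match
  exact ⟨by decide, by decide, by decide, pvChangedA, by decide, by decide⟩

theorem find_longest_match_tight : Claim_exact_find_longest_match := by
  intro ner _ hpre hd
  have hlen : 2 ≤ ner.length := hd.1
  match ner with
  | x :: rest =>
    rcases List.eq_nil_or_concat rest with hrest | ⟨l, e, hrest⟩
    · subst hrest; simp at hlen
    · subst hrest
      simp only [List.concat_eq_append] at *
      have hlong := (pvLong_iff_D x e l hpre).mpr hd
      have hp : pvP ((l ++ [e]).foldl pvStepB ([], [x])).2 = true := by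
        simpa [pvP] using hlong
      rw [pvA_eq, pvB_eq, hp]
      intro h
      have := congrArg List.length h
      simp at this
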